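-- pv_equiv track=rewrite | github.com/fetost/Diskmatte | projekt1.py | touches_x_axis
-- ===== SOURCE A (Python) =====
-- def touches_x_axis(path, start_y):
--     y = start_y
--     for move in path:
--         if move == 'U':
--             y += 1
--         else:
--             y -= 1
--         if y == 0:
--             return True
--     return False
-- ===== SOURCE B (Python) =====
-- def touches_x_axis(path, start_y):
--     if not path:
--         return False
--     y = start_y + (1 if path[0] == 'U' else -1)
--     lo = hi = y
--     for move in path[1:]:
--         y += 1 if move == 'U' else -1
--         if y < lo:
--             lo = y
--         if y > hi:
--             hi = y
--     return lo <= 0 <= hi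
-- ===== Notes on version B (the rewrite author's own statement) =====
-- stated objective: alternative
-- what changed: Instead of testing y == 0 after every step with an early return, B tracks only the min and max post-move positions in one pass and decides via the interval test min <= 0 <= max, which is exact because unit steps visit every integer between the extremes.
import Mathlib
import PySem

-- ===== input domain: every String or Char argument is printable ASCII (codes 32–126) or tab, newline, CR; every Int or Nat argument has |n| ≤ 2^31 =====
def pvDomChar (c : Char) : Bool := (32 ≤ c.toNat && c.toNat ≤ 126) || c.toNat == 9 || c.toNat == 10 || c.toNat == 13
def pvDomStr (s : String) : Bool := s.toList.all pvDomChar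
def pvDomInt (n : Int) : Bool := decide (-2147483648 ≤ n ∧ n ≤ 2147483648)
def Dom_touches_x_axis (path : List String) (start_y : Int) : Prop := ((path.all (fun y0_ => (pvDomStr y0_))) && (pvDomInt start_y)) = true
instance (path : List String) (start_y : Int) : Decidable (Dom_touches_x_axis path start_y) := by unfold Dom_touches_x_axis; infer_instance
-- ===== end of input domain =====

-- B replaces A's step-by-step zero test (early return) by a one-pass min/max of the
-- post-move positions and the interval test min ≤ 0 ≤ max (exact since steps are ±1).

-- ===== PORT A =====
def touches_x_axis (path : List String) (start_y : Int) : Bool :=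
  match path with
  | [] => false
  | move :: rest =>
    let y := if move == "U" then start_y + 1 else start_y - 1
    if y = 0 then true else touches_x_axis rest y

-- ===== PORT B =====
-- the loop of Source B over path[1:]: carries (y, lo, hi), returns the final (lo, hi)
def tx_minmax (rest : List String) (y lo hi : Int) : Int × Int :=
  match rest with
  | [] => (lo, hi)
  | move :: t =>
    let y' := y + (if move == "U" then 1 else -1)
    tx_minmax t y' (if y' < lo then y' else lo) (if hi < y' then y' else hi)

def touches_x_axis_alt (path : List String) (start_y : Int) : Bool :=
  match path with
  | [] => false
  | m :: rest =>
    let y0 := start_y + (if m == "U" then 1 else -1)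
    let r := tx_minmax rest y0 y0 y0
    decide (r.1 ≤ 0 ∧ 0 ≤ r.2)

-- ===== PRECONDITION & SPEC =====
def Spec_touches_x_axis (path : List String) (start_y : Int) (out : Bool) : Prop := out = touches_x_axis_alt path start_y
instance (path : List String) (start_y : Int) (out : Bool) : Decidable (Spec_touches_x_axis path start_y out) := by unfold Spec_touches_x_axis; infer_instance

-- ===== CLAIM (what is proved, stated in full; the proofs are below) =====
def Claim_equal_touches_x_axis : Prop := ∀ (path : List String) (start_y : Int), Dom_touches_x_axis path start_y → Spec_touches_x_axis path start_y (touches_x_axis path start_y)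

-- ===== LEMMAS AND PROOFS =====

-- Invariant lo ≤ y ≤ hi: "the remaining walk hits 0, or 0 already lies in [lo, hi]"
-- is the same as "0 lies in the final [lo, hi]".  Uses only that steps are ±1.
theorem tx_minmax_char : ∀ (rest : List String) (y lo hi : Int), lo ≤ y → y ≤ hi →
    ((touches_x_axis rest y = true ∨ (lo ≤ 0 ∧ 0 ≤ hi)) ↔
      ((tx_minmax rest y lo hi).1 ≤ 0 ∧ 0 ≤ (tx_minmax rest y lo hi).2)) := by
  intro rest
  induction rest with
  | nil =>
    intro y lo hi _ _
    simp [touches_x_axis, tx_minmax]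
  | cons move t ih =>
    intro y lo hi hlo hhi
    have key : ∀ (y' : Int), y' = y + 1 ∨ y' = y - 1 →
        (((if y' = 0 then true else touches_x_axis t y') = true ∨ (lo ≤ 0 ∧ 0 ≤ hi)) ↔
          ((tx_minmax t y' (if y' < lo then y' else lo) (if hi < y' then y' else hi)).1 ≤ 0 ∧
           0 ≤ (tx_minmax t y' (if y' < lo then y' else lo) (if hi < y' then y' else hi)).2)) := by
      intro y' hstep
      have h1 : (if y' < lo then y' else lo) ≤ y' := by split_ifs <;> omega
      have h2 : y' ≤ (if hi < y' then y' else hi) := by split_ifs <;> omega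
      have hif : ((if y' = 0 then true else touches_x_axis t y') = true) ↔
          (y' = 0 ∨ touches_x_axis t y' = true) := by
        split_ifs with h <;> simp [h]
      rw [hif, ← ih y' _ _ h1 h2]
      constructor
      · rintro ((hz | h) | ⟨ha, hb⟩)
        · right; constructor <;> split_ifs <;> omega
        · exact Or.inl h
        · right; constructor <;> split_ifs <;> omega
      · rintro (h | ⟨ha, hb⟩)
        · exact Or.inl (Or.inr h)
        · by_cases hz : y' = 0
          · exact Or.inl (Or.inl hz)
          · right
            rcases hstep with h | h <;> subst h <;>
              constructor <;> split_ifs at ha hb <;> omega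
    by_cases hm : move == "U"
    · have := key (y + 1) (Or.inl rfl)
      simpa only [touches_x_axis, tx_minmax, hm, if_true, reduceIte] using this
    · have := key (y + -1) (Or.inr (by ring))
      simpa only [touches_x_axis, tx_minmax, hm, if_false, reduceIte,
        show y - 1 = y + -1 from by ring] using this

-- ===== VERDICT (by name: the statement is the Claim_ definition above) =====
theorem touches_x_axis_spec : Claim_equal_touches_x_axis := by
  intro path start_y _
  unfold Spec_touches_x_axis
  cases path with
  | nil => rfl
  | cons m rest =>
    have main : ∀ y0 : Int,
        (if y0 = 0 then true else touches_x_axis rest y0) =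
          decide ((tx_minmax rest y0 y0 y0).1 ≤ 0 ∧ 0 ≤ (tx_minmax rest y0 y0 y0).2) := by
      intro y0
      have h := tx_minmax_char rest y0 y0 y0 le_rfl le_rfl
      by_cases hz : y0 = 0
      · rw [if_pos hz]
        exact (decide_eq_true (h.mp (Or.inr (by omega)))).symm
      · rw [if_neg hz]
        cases hA : touches_x_axis rest y0 with
        | true => exact (decide_eq_true (h.mp (Or.inl hA))).symm
        | false =>
          symm
          rw [decide_eq_false_iff_not]
          intro hc
          rcases h.mpr hc with h' | h'
          · rw [hA] at h'; exact Bool.false_ne_true h'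
          · exact hz (by omega)
    by_cases hm : m == "U"
    · have := main (start_y + 1)
      simpa only [touches_x_axis, touches_x_axis_alt, hm, reduceIte] using this
    · have := main (start_y + -1)
      simpa only [touches_x_axis, touches_x_axis_alt, hm, reduceIte,
        show start_y - 1 = start_y + -1 from by ring] using this
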